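-- pv_equiv track=rewrite | github.com/llf-970310/expression-api | analysis-docker/expression/feature_text.py | words_frequency
-- ===== SOURCE A (Python) =====
-- def words_frequency(nouns):
--     temp = {}
--     result = [0, 0, 0]
--     for noun in nouns:
--         if noun in temp.keys():
--             temp[noun] += 1
--         else:
--             temp[noun] = 1
--     for key, value in temp.items():
--         if value >= 2:
--             result[0] += 1
--         if value >= 3:
--             result[1] += 1
--         if value >= 4:
--             result[2] += 1
--     return tuple(result)
-- ===== SOURCE B (Python) =====
-- def words_frequency(nouns):
--     result = [0, 0, 0]
--     rest = list(nouns)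
--     while rest:
--         x = rest[0]
--         c = rest.count(x)
--         rest = [w for w in rest[1:] if w != x]
--         if c >= 2:
--             result[0] += 1
--         if c >= 3:
--             result[1] += 1
--         if c >= 4:
--             result[2] += 1
--     return tuple(result)
-- ===== Notes on version B (the rewrite author's own statement) =====
-- stated objective: alternative
-- what changed: B uses no dictionary at all: a partition-and-remove loop repeatedly takes the first remaining word, counts its occurrences in the remaining list, deletes them all, and bumps the three threshold counters directly.
import Mathlib
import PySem

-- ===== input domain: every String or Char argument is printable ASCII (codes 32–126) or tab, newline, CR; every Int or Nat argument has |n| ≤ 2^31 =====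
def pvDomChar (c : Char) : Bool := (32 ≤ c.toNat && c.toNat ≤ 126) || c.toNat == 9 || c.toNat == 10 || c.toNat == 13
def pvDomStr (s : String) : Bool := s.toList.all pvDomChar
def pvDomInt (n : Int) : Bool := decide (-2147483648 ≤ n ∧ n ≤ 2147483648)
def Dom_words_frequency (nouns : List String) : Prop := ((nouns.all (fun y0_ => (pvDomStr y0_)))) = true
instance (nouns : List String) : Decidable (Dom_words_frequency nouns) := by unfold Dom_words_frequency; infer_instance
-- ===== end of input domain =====

-- B drops the dictionary entirely: a partition-and-remove loop counts and deletes all copies of the first remaining word, bumping the three counters (alternative decomposition; B is slower on many-distinct-word inputs).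


-- ===== PORT A =====
-- 'temp[noun] += 1' reads an existing key, so getD n 0 + 1 is exact in that branch.
def words_frequency (nouns : List String) : Int × Int × Int :=
  let temp := nouns.foldl
    (fun (d : PySem.Dict String Int) n =>
      if d.contains n then d.insert n (d.getD n 0 + 1) else d.insert n 1)
    PySem.Dict.empty
  let result := temp.items.foldl
    (fun (r : Int × Int × Int) kv =>
      let r0 := if kv.2 ≥ 2 then r.1 + 1 else r.1
      let r1 := if kv.2 ≥ 3 then r.2.1 + 1 else r.2.1
      let r2 := if kv.2 ≥ 4 then r.2.2 + 1 else r.2.2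
      (r0, r1, r2))
    ((0 : Int), (0 : Int), (0 : Int))
  result

-- ===== PORT B =====
-- the while loop of Source B: state = (rest, result); terminates because the filter shortens rest
def wfLoop (rest : List String) (r : Int × Int × Int) : Int × Int × Int :=
  match rest with
  | [] => r
  | x :: t =>
    let c : Int := (PySem.List.count (x :: t) x : Int)
    let rest' := t.filter (fun w => w != x)
    wfLoop rest'
      ((if c ≥ 2 then r.1 + 1 else r.1),
       (if c ≥ 3 then r.2.1 + 1 else r.2.1),
       (if c ≥ 4 then r.2.2 + 1 else r.2.2))
termination_by rest.length
decreasing_by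
  simpa using Nat.lt_succ_of_le (List.length_filter_le _ t)

def words_frequency_alt (nouns : List String) : Int × Int × Int :=
  wfLoop nouns ((0 : Int), (0 : Int), (0 : Int))

-- ===== PRECONDITION & SPEC =====
def Spec_words_frequency (nouns : List String) (out : Int × Int × Int) : Prop := out = words_frequency_alt nouns
instance (nouns : List String) (out : Int × Int × Int) : Decidable (Spec_words_frequency nouns out) := by unfold Spec_words_frequency; infer_instance

-- ===== CLAIM =====
def Claim_equal_words_frequency : Prop := ∀ (nouns : List String), Dom_words_frequency nouns → Spec_words_frequency nouns (words_frequency nouns)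

-- ===== LEMMAS AND PROOFS =====

-- number of distinct words of l with at least k occurrences (the common characterisation)
def distCnt (k : Int) (l : List String) : Int :=
  ((PySem.Set.ofList l).countP (fun w => decide (k ≤ (l.count w : Int))) : Int)

-- A's counting step equals a plain counter step: when the key is absent, getD gives 0.
lemma countStep_eq :
    (fun (d : PySem.Dict String Int) n =>
      if d.contains n then d.insert n (d.getD n 0 + 1) else d.insert n 1)
    = (fun (d : PySem.Dict String Int) n => d.insert n (d.getD n 0 + 1)) := by
  funext d n
  by_cases h : d.contains n
  · simp [h]
  · simp only [h]
    rw [PySem.Dict.getD_of_not_contains d (0 : Int) (by simpa using h)]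
    simp

-- A's tally loop computes the three threshold counts.
lemma tripleFold (l : List (String × Int)) (a b c : Int) :
    l.foldl
      (fun (r : Int × Int × Int) kv =>
        let r0 := if kv.2 ≥ 2 then r.1 + 1 else r.1
        let r1 := if kv.2 ≥ 3 then r.2.1 + 1 else r.2.1
        let r2 := if kv.2 ≥ 4 then r.2.2 + 1 else r.2.2
        (r0, r1, r2))
      (a, b, c)
    = (a + (l.countP (fun kv => kv.2 ≥ 2) : Int),
       b + (l.countP (fun kv => kv.2 ≥ 3) : Int),
       c + (l.countP (fun kv => kv.2 ≥ 4) : Int)) := by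
  induction l generalizing a b c with
  | nil => simp
  | cons kv t ih =>
    simp only [List.foldl_cons, List.countP_cons, ih]
    refine Prod.ext ?_ (Prod.ext ?_ ?_) <;>
      simp only [ge_iff_le, decide_eq_true_eq] <;>
      split_ifs with h <;> push_cast <;> omega

-- Set.add commutes with a cons of a different element
lemma foldl_add_cons (x : String) (s : List String) (hx : x ∉ s) (t : List String) :
    t.foldl PySem.Set.add (x :: s)
      = x :: (t.filter (fun w => w != x)).foldl PySem.Set.add s := by
  induction t generalizing s with
  | nil => simp
  | cons w t ih =>
    by_cases hwx : w = x
    · subst hwx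
      have : PySem.Set.add (w :: s) w = w :: s := by
        simp [PySem.Set.add, PySem.Set.contains]
      simp [ih s hx]
    · have hcont : PySem.Set.contains (x :: s) w = PySem.Set.contains s w := by
        simp [PySem.Set.contains, hwx]
      have hadd : PySem.Set.add (x :: s) w = x :: PySem.Set.add s w := by
        by_cases h : w ∈ s <;> simp [PySem.Set.add, PySem.Set.contains, hwx, h]
      have hx' : x ∉ PySem.Set.add s w := by
        simp [PySem.Set.add]
        split
        · exact hx
        · simp [hx, Ne.symm hwx]
      simp only [List.foldl_cons, hadd, ih _ hx',
        List.filter_cons, bne_iff_ne, ne_eq, hwx, not_false_eq_true]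
      simp

-- first-occurrence dedup of x::t = x followed by dedup of t with all x's removed
lemma ofList_cons_filter (x : String) (t : List String) :
    PySem.Set.ofList (x :: t)
      = x :: PySem.Set.ofList (t.filter (fun w => w != x)) := by
  have h1 : PySem.Set.ofList (x :: t) = t.foldl PySem.Set.add [x] := by
    simp [PySem.Set.ofList_eq_foldl, PySem.Set.add, PySem.Set.contains]
  rw [h1, foldl_add_cons x [] (by simp) t, PySem.Set.ofList_eq_foldl]

-- removing all copies of x does not change the multiplicity of any other word
lemma count_filter_ne (x y : String) (hwx : y ≠ x) (t : List String) :
    (t.filter (fun w => w != x)).count y = t.count y := by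
  induction t with
  | nil => simp
  | cons u t ih =>
    by_cases hux : u = x
    · subst hux
      simp [Ne.symm hwx, ih]
    · simp [hux, List.count_cons, ih]

-- distCnt splits off the first word's class
lemma distCnt_cons (k : Int) (x : String) (t : List String) :
    distCnt k (x :: t)
      = (if k ≤ ((x :: t).count x : Int) then 1 else 0)
        + distCnt k (t.filter (fun w => w != x)) := by
  unfold distCnt
  rw [ofList_cons_filter, List.countP_cons]
  have hcong :
      (PySem.Set.ofList (t.filter (fun w => w != x))).countP
          (fun w => decide (k ≤ (((x :: t).count w : Int))))
        = (PySem.Set.ofList (t.filter (fun w => w != x))).countP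
          (fun w => decide (k ≤ (((t.filter (fun w => w != x)).count w : Int)))) := by
    apply List.countP_congr
    intro w hw
    have hwmem : w ∈ t.filter (fun w => w != x) := by
      have := (PySem.Set.mem_ofList _ _).1 hw
      exact this
    have hwx : w ≠ x := by
      have := List.of_mem_filter hwmem
      simpa using this
    rw [count_filter_ne x w hwx t]
    simp [Ne.symm hwx]
  rw [hcong]
  split_ifs with h h2 <;> (try simp_all) <;> omega

-- the loop invariant: wfLoop adds the three distinct-word threshold counts
lemma wfLoop_eq_aux (n : Nat) : ∀ (l : List String), l.length ≤ n → ∀ (r : Int × Int × Int),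
    wfLoop l r = (r.1 + distCnt 2 l, r.2.1 + distCnt 3 l, r.2.2 + distCnt 4 l) := by
  induction n with
  | zero =>
    intro l hl r
    have : l = [] := List.eq_nil_of_length_eq_zero (Nat.le_zero.mp hl)
    subst this
    simp [wfLoop, distCnt]
  | succ n ih =>
    intro l hl r
    match l with
    | [] => simp [wfLoop, distCnt]
    | x :: t =>
      rw [wfLoop]
      rw [ih (t.filter (fun w => w != x))
        (le_trans (List.length_filter_le _ t) (Nat.le_of_succ_le_succ hl))]
      rw [distCnt_cons 2, distCnt_cons 3, distCnt_cons 4]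
      have hcv : ((PySem.List.count (x :: t) x : Nat) : Int) = ((x :: t).count x : Int) := by
        simp [PySem.List.count_eq]
      refine Prod.ext ?_ (Prod.ext ?_ ?_) <;> simp only [] <;>
        rw [hcv] <;> split_ifs with h <;> simp_all <;> ring

lemma wfLoop_eq (l : List String) (r : Int × Int × Int) :
    wfLoop l r = (r.1 + distCnt 2 l, r.2.1 + distCnt 3 l, r.2.2 + distCnt 4 l) :=
  wfLoop_eq_aux l.length l (le_refl _) r

-- ===== VERDICT =====
theorem words_frequency_spec : Claim_equal_words_frequency := by
  intro nouns _
  show words_frequency nouns = words_frequency_alt nouns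
  unfold words_frequency words_frequency_alt
  dsimp only
  rw [countStep_eq]
  simp only [PySem.Dict.foldl_insert_getD_add_one_eq_counter]
  rw [PySem.Dict.items_counter, tripleFold, wfLoop_eq]
  simp only [List.countP_map, distCnt]
  simp [Function.comp_def, ge_iff_le]
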